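-- pv_equiv track=rewrite | github.com/bx3/EE595 | seq_helper.py | compute_splitting_error
-- ===== SOURCE A (Python) =====
-- def compute_splitting_error(class_list, cluster_list):
--     splitting_err = 0
--     list_num = len(class_list)
--     for i in range(list_num):
--         the_class = class_list[i]
--         the_cluster = cluster_list[i]
--
--         for j in range(i, list_num):
--             other_class = class_list[j]
--             other_cluster = cluster_list[j]
--             if the_class==other_class and the_cluster!=other_cluster:
--                 splitting_err += 1
--     return splitting_err
-- ===== SOURCE B (Python) =====
-- def compute_splitting_error(class_list, cluster_list):
--     # One pass: each element pairs with the earlier elements of the same class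
--     # that sit in a different cluster = (#earlier same class) - (#earlier same (class, cluster)).
--     cls_cnt = {}
--     pair_cnt = {}
--     err = 0
--     for c, k in zip(class_list, cluster_list):
--         err += cls_cnt.get(c, 0) - pair_cnt.get((c, k), 0)
--         cls_cnt[c] = cls_cnt.get(c, 0) + 1
--         pair_cnt[(c, k)] = pair_cnt.get((c, k), 0) + 1
--     return err
-- ===== Notes on version B (the rewrite author's own statement) =====
-- stated objective: faster
-- what changed: Replaced the O(n^2) nested index loops by a single pass that keeps running counts of each class and of each (class, cluster) pair in dictionaries, adding their difference per element.
import Mathlib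
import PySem

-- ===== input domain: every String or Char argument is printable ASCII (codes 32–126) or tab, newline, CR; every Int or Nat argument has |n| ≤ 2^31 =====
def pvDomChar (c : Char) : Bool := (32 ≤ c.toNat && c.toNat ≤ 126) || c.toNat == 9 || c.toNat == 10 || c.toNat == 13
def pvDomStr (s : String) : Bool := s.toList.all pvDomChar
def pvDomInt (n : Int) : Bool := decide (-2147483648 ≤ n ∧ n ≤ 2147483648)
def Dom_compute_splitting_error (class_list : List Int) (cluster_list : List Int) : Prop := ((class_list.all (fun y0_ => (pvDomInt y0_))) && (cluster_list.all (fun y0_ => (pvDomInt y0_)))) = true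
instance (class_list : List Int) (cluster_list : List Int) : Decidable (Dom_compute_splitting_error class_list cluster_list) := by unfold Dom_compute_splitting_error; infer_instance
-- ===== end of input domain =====

-- B replaces A's quadratic nested index loops by one pass with running count dictionaries (objective: faster, asymptotically).

-- ===== PORT A =====
-- indexing is exact via pyGetD; Pre_ below excludes the IndexError case, so the default 0 is never the result
def compute_splitting_error (class_list : List Int) (cluster_list : List Int) : Int :=
  let splitting_err : Int := 0
  let list_num : Int := (class_list.length : Int)
  (PySem.List.pyRange 0 list_num 1).foldl (fun splitting_err i =>
    let the_class := PySem.List.pyGetD class_list i 0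
    let the_cluster := PySem.List.pyGetD cluster_list i 0
    (PySem.List.pyRange i list_num 1).foldl (fun splitting_err j =>
      let other_class := PySem.List.pyGetD class_list j 0
      let other_cluster := PySem.List.pyGetD cluster_list j 0
      if the_class = other_class ∧ the_cluster ≠ other_cluster then splitting_err + 1
      else splitting_err) splitting_err) splitting_err

-- ===== PORT B =====
-- the body of B's single loop (dicts: class -> count, (class, cluster) -> count, running error)
def pvStepB (st : PySem.Dict Int Int × PySem.Dict (Int × Int) Int × Int) (ck : Int × Int) :
    PySem.Dict Int Int × PySem.Dict (Int × Int) Int × Int :=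
  (st.1.insert ck.1 (st.1.getD ck.1 0 + 1),
   st.2.1.insert ck (st.2.1.getD ck 0 + 1),
   st.2.2 + (st.1.getD ck.1 0 - st.2.1.getD ck 0))

def compute_splitting_error_alt (class_list : List Int) (cluster_list : List Int) : Int :=
  ((class_list.zip cluster_list).foldl pvStepB (PySem.Dict.empty, PySem.Dict.empty, 0)).2.2

-- ===== PRECONDITION & SPEC =====
-- A raises IndexError (cluster_list[i]) exactly when cluster_list is shorter than class_list; nothing else is excluded.
def Pre_compute_splitting_error (class_list : List Int) (cluster_list : List Int) : Prop :=
  class_list.length ≤ cluster_list.length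
instance (class_list : List Int) (cluster_list : List Int) : Decidable (Pre_compute_splitting_error class_list cluster_list) := by unfold Pre_compute_splitting_error; infer_instance

def pvWitness_compute_splitting_error : List Int × List Int := ([1, 1, 2, 1], [0, 1, 0, 0])

def Spec_compute_splitting_error (class_list : List Int) (cluster_list : List Int) (out : Int) : Prop := out = compute_splitting_error_alt class_list cluster_list
instance (class_list : List Int) (cluster_list : List Int) (out : Int) : Decidable (Spec_compute_splitting_error class_list cluster_list out) := by unfold Spec_compute_splitting_error; infer_instance

-- ===== CLAIM (what is proved, stated in full; the proofs are below) =====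
def Claim_equal_compute_splitting_error : Prop := ∀ (class_list : List Int) (cluster_list : List Int), Dom_compute_splitting_error class_list cluster_list → Pre_compute_splitting_error class_list cluster_list → Spec_compute_splitting_error class_list cluster_list (compute_splitting_error class_list cluster_list)

-- ===== LEMMAS AND PROOFS =====

-- Bool predicate: same class, different cluster
def pvP (x y : Int × Int) : Bool := x.1 == y.1 && x.2 != y.2

-- reference count: for each element, the later same-class different-cluster elements
def pvF : List (Int × Int) → Int
  | [] => 0
  | y :: t => (t.countP (pvP y) : Int) + pvF t

lemma pvP_self (x : Int × Int) : pvP x x = false := by simp [pvP]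

-- counting identity: (# y with y.1 = x.1 ∧ y.2 ≠ x.2) + (# y = x) = (# y with y.1 = x.1)
lemma pvCount_split (l : List (Int × Int)) (x : Int × Int) :
    l.countP (fun y => pvP y x) + l.count x = (l.map Prod.fst).count x.1 := by
  induction l with
  | nil => simp
  | cons y t ih =>
    simp only [List.countP_cons, List.count_cons, List.map_cons]
    by_cases h1 : y.1 = x.1
    · by_cases h2 : y.2 = x.2
      · have hyx : y = x := Prod.ext h1 h2
        subst hyx
        simp [pvP, ← ih]
        omega
      · have hyx : ¬ (y = x) := by intro h; exact h2 (by rw [h])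
        simp only [pvP, ← ih, h1]
        simp [hyx, h2]
        omega
    · have hyx : ¬ (y = x) := by intro h; exact h1 (by rw [h])
      simp [pvP, h1, hyx, ← ih]
  
-- pvF over a snoc: the new element pairs with the earlier matching ones
lemma pvF_snoc (l : List (Int × Int)) (x : Int × Int) :
    pvF (l ++ [x]) = pvF l + (l.countP (fun y => pvP y x) : Int) := by
  induction l with
  | nil => simp [pvF]
  | cons y t ih =>
    simp only [List.cons_append, pvF, ih, List.countP_append, List.countP_cons]
    simp only [List.countP_nil]
    push_cast
    ring

-- components of B's fold are plain counting folds
lemma pvFold_fst (l : List (Int × Int)) (s : PySem.Dict Int Int × PySem.Dict (Int × Int) Int × Int) :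
    (l.foldl pvStepB s).1 = (l.map Prod.fst).foldl (fun d x => d.insert x (d.getD x 0 + 1)) s.1 := by
  induction l generalizing s with
  | nil => rfl
  | cons y t ih => simp [List.foldl_cons, ih, pvStepB]

lemma pvFold_snd (l : List (Int × Int)) (s : PySem.Dict Int Int × PySem.Dict (Int × Int) Int × Int) :
    (l.foldl pvStepB s).2.1 = l.foldl (fun d x => d.insert x (d.getD x 0 + 1)) s.2.1 := by
  induction l generalizing s with
  | nil => rfl
  | cons y t ih => simp [List.foldl_cons, ih, pvStepB]

-- the error component of B's fold computes pvF
lemma pvFold_err (l : List (Int × Int)) :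
    (l.foldl pvStepB (PySem.Dict.empty, PySem.Dict.empty, 0)).2.2 = pvF l := by
  induction l using List.reverseRecOn with
  | nil => rfl
  | append_singleton t x ih =>
    rw [List.foldl_append]
    simp only [List.foldl_cons, List.foldl_nil, pvStepB, ih, pvFold_fst, pvFold_snd]
    rw [PySem.Dict.getD_foldl_insert_add_one, PySem.Dict.getD_foldl_insert_add_one,
        PySem.Dict.getD_empty, PySem.Dict.getD_empty, pvF_snoc]
    have h := pvCount_split t x
    push_cast [← h]
    ring

-- A's inner loop count over indices [a, n) equals the count over the dropped zip
lemma pvInner (cl ku : List Int) (h : cl.length ≤ ku.length) (a : Nat) (ha : a < cl.length) :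
    (((PySem.List.pyRange (a : Int) (cl.length : Int) 1).countP (fun j =>
        decide (PySem.List.pyGetD cl (a : Int) 0 = PySem.List.pyGetD cl j 0 ∧
                PySem.List.pyGetD ku (a : Int) 0 ≠ PySem.List.pyGetD ku j 0))) : Int)
    = (((cl.zip ku).drop a).countP (pvP ((cl.zip ku)[a]'(by simp [List.length_zip]; omega))) : Int) := by
  have hzlen : (cl.zip ku).length = cl.length := by simp [List.length_zip]; omega
  have hka : a < ku.length := by omega
  have hgcl : ∀ (i : Int), 0 ≤ i → i < (cl.length : Int) →
      PySem.List.pyGetD cl i 0 = cl.getD i.toNat 0 := by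
    intro i h1 h2
    rw [PySem.List.pyGetD_eq_getElem cl 0 h1 h2, List.getD_eq_getElem cl 0 (by omega)]
  have hgku : ∀ (i : Int), 0 ≤ i → i < (cl.length : Int) →
      PySem.List.pyGetD ku i 0 = ku.getD i.toNat 0 := by
    intro i h1 h2
    have hki : i < (ku.length : Int) := by
      have : (cl.length : Int) ≤ (ku.length : Int) := by exact_mod_cast h
      omega
    rw [PySem.List.pyGetD_eq_getElem ku 0 h1 hki, List.getD_eq_getElem ku 0 (by omega)]
  have hgzs : ∀ (i : Int), 0 ≤ i → i < (cl.length : Int) →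
      PySem.List.pyGetD (cl.zip ku) i ((0 : Int), (0 : Int)) = (cl.zip ku).getD i.toNat ((0 : Int), (0 : Int)) := by
    intro i h1 h2
    have hzi : i < ((cl.zip ku).length : Int) := by
      have : ((cl.zip ku).length : Int) = (cl.length : Int) := by exact_mod_cast hzlen
      omega
    rw [PySem.List.pyGetD_eq_getElem (cl.zip ku) ((0 : Int), (0 : Int)) h1 hzi, List.getD_eq_getElem _ _ (by omega)]
  have hA : ∀ j ∈ PySem.List.pyRange (a : Int) (cl.length : Int) 1,
      (decide (PySem.List.pyGetD cl (a : Int) 0 = PySem.List.pyGetD cl j 0 ∧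
               PySem.List.pyGetD ku (a : Int) 0 ≠ PySem.List.pyGetD ku j 0))
      = pvP ((cl.zip ku)[a]'(by omega)) (PySem.List.pyGetD (cl.zip ku) j ((0 : Int), (0 : Int))) := by
    intro j hj
    rw [PySem.List.mem_pyRange_one] at hj
    obtain ⟨hj1, hj2⟩ := hj
    have h0j : (0 : Int) ≤ j := le_trans (by positivity) hj1
    have hjn : j.toNat < cl.length := by omega
    have hjk : j.toNat < ku.length := by omega
    have hjz : j.toNat < (cl.zip ku).length := by omega
    rw [hgcl (a : Int) (by positivity) (by exact_mod_cast ha),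
        hgcl j h0j hj2,
        hgku (a : Int) (by positivity) (by exact_mod_cast ha),
        hgku j h0j hj2,
        hgzs j h0j hj2]
    simp only [Int.toNat_natCast]
    rw [Bool.eq_iff_iff]
    simp [pvP]
    simp [hjn, hjk, ha, hka, List.getElem_zip]
  rw [List.countP_congr (fun x hx => by rw [hA x hx])]
  have hm := List.countP_map (p := pvP ((cl.zip ku)[a]'(by omega)))
    (f := fun i => PySem.List.pyGetD (cl.zip ku) i ((0 : Int), (0 : Int)))
    (l := PySem.List.pyRange (a : Int) (cl.length : Int) 1)
  rw [Function.comp_def] at hm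
  have hmap : List.map (fun i => PySem.List.pyGetD (cl.zip ku) i ((0 : Int), (0 : Int)))
      (PySem.List.pyRange (a : Int) (cl.length : Int) 1) = (cl.zip ku).drop a := by
    have hd := PySem.List.map_pyGetD_pyRange' (cl.zip ku) ((0 : Int), (0 : Int)) (a := (a : Int)) (by positivity)
    rw [hzlen] at hd
    simpa using hd
  rw [← hm, hmap]

-- A's outer loop from index a accumulates pvF of the dropped zip
lemma pvOuter (cl ku : List Int) (h : cl.length ≤ ku.length) :
    ∀ (k a : Nat), a + k = cl.length →
    ∀ (init : Int),
    (PySem.List.pyRange (a : Int) (cl.length : Int) 1).foldl (fun splitting_err i =>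
      let the_class := PySem.List.pyGetD cl i 0
      let the_cluster := PySem.List.pyGetD ku i 0
      (PySem.List.pyRange i (cl.length : Int) 1).foldl (fun splitting_err j =>
        let other_class := PySem.List.pyGetD cl j 0
        let other_cluster := PySem.List.pyGetD ku j 0
        if the_class = other_class ∧ the_cluster ≠ other_cluster then splitting_err + 1
        else splitting_err) splitting_err) init
      = init + pvF ((cl.zip ku).drop a) := by
  intro k
  induction k with
  | zero =>
    intro a hak init
    have hzslen : (cl.zip ku).length = cl.length := by simp [List.length_zip]; omega
    rw [PySem.List.pyRange_one_eq_nil (by omega)]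
    rw [List.drop_eq_nil_of_le (by omega)]
    simp [pvF]
  | succ k ih =>
    intro a hak init
    have hzslen : (cl.zip ku).length = cl.length := by simp [List.length_zip]; omega
    have halt : a < cl.length := by omega
    have ha : (a : Int) < (cl.length : Int) := by exact_mod_cast halt
    rw [PySem.List.pyRange_one_cons ha]
    simp only [List.foldl_cons]
    rw [PySem.List.foldl_ite_add_one]
    rw [pvInner cl ku h a halt]
    have hdrop : (cl.zip ku).drop a = (cl.zip ku)[a]'(by omega) :: (cl.zip ku).drop (a + 1) :=
      (List.getElem_cons_drop _).symm
    have hcast : ((a : Int) + 1) = ((a + 1 : Nat) : Int) := by push_cast; ring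
    rw [hcast, ih (a + 1) (by omega) _]
    rw [hdrop]
    simp [pvF, pvP_self]
    ring

-- A's port computes pvF of the zip
lemma pvPortA (cl ku : List Int) (h : cl.length ≤ ku.length) :
    compute_splitting_error cl ku = pvF (cl.zip ku) := by
  have := pvOuter cl ku h cl.length 0 (by omega) 0
  simpa [compute_splitting_error] using this

-- ===== VERDICT (by name: the statement is the Claim_ definition above) =====
theorem compute_splitting_error_spec : Claim_equal_compute_splitting_error := by
  intro cl ku _ hpre
  unfold Spec_compute_splitting_error
  rw [pvPortA cl ku hpre, compute_splitting_error_alt, pvFold_err]
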